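-- pv_equiv track=rewrite | github.com/PaleovirologyLab/hi-fever | bin/stop_convert_and_count.py | stop_handler
-- ===== SOURCE A (Python) =====
-- def stop_handler(sequence, action):
--     codon_table = {
--         "TAA": "taa",
--         "TAG": "tag",
--         "TGA": "tga"
--     }
--
--     stop_codons = 0
--     result = []
--     for i in range(0, len(sequence), 3):
--         codon = sequence[i:i + 3]
--         if codon in codon_table:
--             stop_codons += 1
--             if action == "soft-mask":
--                 result.append(codon_table[codon])
--         else:
--             result.append(codon)
--
--     return "".join(result), stop_codons
-- ===== SOURCE B (Python) =====
-- def stop_handler(sequence, action):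
--     masking = (action == "soft-mask")
--     stops = 0
--     parts = []
--     buf = []
--     for ch in sequence:
--         buf.append(ch)
--         if len(buf) == 3:
--             codon = "".join(buf)
--             if codon in ("TAA", "TAG", "TGA"):
--                 stops += 1
--                 if masking:
--                     parts.append(codon.lower())
--             else:
--                 parts.append(codon)
--             buf = []
--     parts.append("".join(buf))
--     return "".join(parts), stops
-- ===== Notes on version B (the rewrite author's own statement) =====
-- stated objective: alternative
-- what changed: Replaces A's index loop over range(0,len,3) with string slicing and a dict by a single character-streaming pass that accumulates a 3-char buffer, classifies codons by tuple membership and soft-masks with .lower(), flushing the buffer as it fills.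
import Mathlib
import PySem

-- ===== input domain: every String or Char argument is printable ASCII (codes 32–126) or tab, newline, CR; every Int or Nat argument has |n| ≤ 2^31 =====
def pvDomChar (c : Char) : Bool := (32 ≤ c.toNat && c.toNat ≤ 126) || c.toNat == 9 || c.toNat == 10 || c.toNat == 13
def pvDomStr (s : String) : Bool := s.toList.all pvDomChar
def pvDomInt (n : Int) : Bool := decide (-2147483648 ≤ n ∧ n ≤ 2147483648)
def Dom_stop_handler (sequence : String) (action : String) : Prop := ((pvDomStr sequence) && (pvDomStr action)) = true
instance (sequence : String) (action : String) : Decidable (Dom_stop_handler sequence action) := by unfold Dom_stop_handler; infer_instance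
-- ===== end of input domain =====

-- B replaces A's index/slice/dict loop by a character-streaming pass with a 3-char buffer,
-- tuple membership and .lower(); objective: alternative (same O(n) cost, different traversal).

-- ===== PORT A =====
-- the literal dict A declares
def pvCodonTable : PySem.Dict String String :=
  PySem.Dict.ofList [("TAA", "taa"), ("TAG", "tag"), ("TGA", "tga")]

def stop_handler (sequence : String) (action : String) : String × Int :=
  let fin := (PySem.List.pyRange 0 (PySem.Str.len sequence) 3).foldl
    (fun (st : Int × List String) i =>
      let codon := PySem.Str.slice sequence (some i) (some (i + 3))
      if pvCodonTable.contains codon then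
        (st.1 + 1,
          if action == "soft-mask" then st.2 ++ [(pvCodonTable.get? codon).getD ""] else st.2)
      else (st.1, st.2 ++ [codon]))
    ((0 : Int), ([] : List String))
  (PySem.Str.join "" fin.2, fin.1)

-- ===== PORT B =====
-- one step of B's character loop: push ch into the buffer, flush it as a codon when it holds 3 chars
-- ("".join(buf) over a list of single chars is String.ofList; codon in ("TAA","TAG","TGA") is the three ==-tests)
def pvStepB (masking : Bool) (st : Int × List String × List Char) (ch : Char) : Int × List String × List Char :=
  let buf := st.2.2 ++ [ch]
  if buf.length == 3 then
    let codon := String.ofList buf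
    if codon == "TAA" || codon == "TAG" || codon == "TGA" then
      (st.1 + 1, (if masking then st.2.1 ++ [PySem.Str.lower codon] else st.2.1), ([] : List Char))
    else
      (st.1, st.2.1 ++ [codon], ([] : List Char))
  else (st.1, st.2.1, buf)

def stop_handler_alt (sequence : String) (action : String) : String × Int :=
  let masking := action == "soft-mask"
  let fin := sequence.toList.foldl (pvStepB masking) ((0 : Int), ([] : List String), ([] : List Char))
  (PySem.Str.join "" (fin.2.1 ++ [String.ofList fin.2.2]), fin.1)

-- ===== PRECONDITION & SPEC =====
def Spec_stop_handler (sequence : String) (action : String) (out : String × Int) : Prop := out = stop_handler_alt sequence action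
instance (sequence : String) (action : String) (out : String × Int) : Decidable (Spec_stop_handler sequence action out) := by unfold Spec_stop_handler; infer_instance

-- ===== CLAIM =====
def Claim_equal_stop_handler : Prop := ∀ (sequence : String) (action : String), Dom_stop_handler sequence action → Spec_stop_handler sequence action (stop_handler sequence action)

-- ===== LEMMAS AND PROOFS =====

-- the common per-codon body both loops perform once the codon string is in hand
def pvIsStop (c : String) : Bool := c == "TAA" || c == "TAG" || c == "TGA"

def pvBody (m : Bool) (st : Int × List String) (c : String) : Int × List String :=
  if pvIsStop c then (st.1 + 1, if m then st.2 ++ [PySem.Str.lower c] else st.2)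
  else (st.1, st.2 ++ [c])

-- the full 3-char chunks of a list, and the short remainder (length ≤ 2)
def pvFull : List Char → List (List Char)
  | a :: b :: c :: rest => [a, b, c] :: pvFull rest
  | _ => []

def pvRem : List Char → List Char
  | _ :: _ :: _ :: rest => pvRem rest
  | l => l

def pvChunks (l : List Char) : List (List Char) :=
  pvFull l ++ (if pvRem l = [] then [] else [pvRem l])

theorem pvChunks_cons (l : List Char) (h : l ≠ []) :
    pvChunks l = l.take 3 :: pvChunks (l.drop 3) := by
  rcases l with _ | ⟨a, _ | ⟨b, _ | ⟨c, rest⟩⟩⟩ <;>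
    simp [pvChunks, pvFull, pvRem] at h ⊢

theorem pvRem_len : ∀ l : List Char, (pvRem l).length ≤ 2
  | [] => by simp [pvRem]
  | [_] => by simp [pvRem]
  | [_, _] => by simp [pvRem]
  | _ :: _ :: _ :: rest => by simpa [pvRem] using pvRem_len rest

theorem pvIsStop_short (rem : List Char) (h : rem.length ≤ 2) :
    pvIsStop (String.ofList rem) = false := by
  unfold pvIsStop
  have f : ∀ t : String, t.toList.length = 3 → (String.ofList rem == t) = false := by
    intro t ht
    rw [beq_eq_false_iff_ne]
    rintro rfl
    simp at ht
    omega
  simp [f "TAA" (by decide), f "TAG" (by decide), f "TGA" (by decide)]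

-- A's per-index body, once the slice is named, is pvBody
theorem pvBodyA_eq (m : Bool) (st : Int × List String) (c : String) :
    (if pvCodonTable.contains c then
        (st.1 + 1, if m then st.2 ++ [(pvCodonTable.get? c).getD ""] else st.2)
      else (st.1, st.2 ++ [c]))
    = pvBody m st c := by
  unfold pvBody pvIsStop
  by_cases h1 : c = "TAA"
  · subst h1
    rw [show pvCodonTable.contains "TAA" = true from by decide,
        show (pvCodonTable.get? "TAA").getD "" = "taa" from by decide,
        show PySem.Str.lower "TAA" = "taa" from by decide]
    simp
  · by_cases h2 : c = "TAG"
    · subst h2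
      rw [show pvCodonTable.contains "TAG" = true from by decide,
          show (pvCodonTable.get? "TAG").getD "" = "tag" from by decide,
          show PySem.Str.lower "TAG" = "tag" from by decide]
      simp
    · by_cases h3 : c = "TGA"
      · subst h3
        rw [show pvCodonTable.contains "TGA" = true from by decide,
            show (pvCodonTable.get? "TGA").getD "" = "tga" from by decide,
            show PySem.Str.lower "TGA" = "tga" from by decide]
        simp
      · have hc : pvCodonTable.contains c = false := by
          have hmk : pvCodonTable = PySem.Dict.mk [("TAA", "taa"), ("TAG", "tag"), ("TGA", "tga")] := by decide
          rw [hmk, PySem.Dict.contains_mk]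
          simp [beq_eq_false_iff_ne, Ne.symm h1, Ne.symm h2, Ne.symm h3]
        have hcb : (c == "TAA" || c == "TAG" || c == "TGA") = false := by
          simp [beq_eq_false_iff_ne, h1, h2, h3]
        simp [hc, hcb]

-- range(0, n, 3) peels its first index
theorem pvRange_peel (n : Int) (h : 0 < n) :
    PySem.List.pyRange 0 n 3 = 0 :: (PySem.List.pyRange 0 (n - 3) 3).map (· + 3) := by
  rw [PySem.List.pyRange_of_pos 0 n (show (0:Int) < 3 by norm_num),
      PySem.List.pyRange_of_pos 0 (n-3) (show (0:Int) < 3 by norm_num)]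
  by_cases h3 : 0 < n - 3
  · rw [if_pos h, if_pos (by omega)]
    have q0 : (0:Int) ≤ (n - 3 - 0 + 3 - 1) / 3 := Int.ediv_nonneg (by omega) (by norm_num)
    have hq : (n - 0 + 3 - 1) / 3 = (n - 3 - 0 + 3 - 1) / 3 + 1 := by
      have he : n - 0 + 3 - 1 = (n - 3 - 0 + 3 - 1) + 1 * 3 := by ring
      rw [he, Int.add_mul_ediv_right _ _ (by norm_num)]
    rw [hq, Int.toNat_add q0 (by norm_num : (0:Int) ≤ 1),
        show Int.toNat 1 = 1 from rfl, List.range_succ_eq_map]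
    simp [List.map_map, Function.comp]
    intro a _; ring
  · rw [if_pos h, if_neg h3]
    have hq : (n - 0 + 3 - 1) / 3 = 1 := by
      have he : n - 0 + 3 - 1 = (n + 2 - 3) + 1 * 3 := by ring
      rw [he, Int.add_mul_ediv_right _ _ (by norm_num)]
      have : (n + 2 - 3) / 3 = 0 := by
        apply Int.ediv_eq_zero_of_lt <;> omega
      omega
    rw [hq]
    simp

theorem pvRange_nil (n : Int) (h : n ≤ 0) : PySem.List.pyRange 0 n 3 = [] := by
  rw [PySem.List.pyRange_of_pos 0 n (show (0:Int) < 3 by norm_num), if_neg (by omega)]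
  simp

theorem pvSliceShift (l : List Char) (i : Int) (hi : 0 ≤ i) :
    PySem.List.slice l (some (i + 3)) (some (i + 3 + 3))
      = PySem.List.slice (l.drop 3) (some i) (some (i + 3)) := by
  rw [PySem.List.slice_toNat _ (by omega) (by omega),
      PySem.List.slice_toNat _ hi (by omega),
      List.drop_drop]
  rw [show (i + 3).toNat = i.toNat + 3 by omega, show (i + 3 + 3).toNat = i.toNat + 6 by omega,
      Nat.add_comm 3 i.toNat]
  congr 1
  omega

-- the slice list A walks IS the chunk list
theorem pvSliceList : ∀ l : List Char,
    (PySem.List.pyRange 0 (l.length : Int) 3).map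
        (fun i => PySem.List.slice l (some i) (some (i + 3)))
      = pvChunks l
  | [] => by
    simp only [List.length_nil, Nat.cast_zero, pvRange_nil 0 le_rfl]
    simp [pvChunks, pvFull, pvRem]
  | (a :: rest) => by
    have hn : (0:Int) < ((a :: rest).length : Int) := by exact_mod_cast Nat.succ_pos rest.length
    rw [pvRange_peel _ hn, pvChunks_cons _ (by simp)]
    simp only [List.map_cons, List.map_map]
    congr 1
    · rw [show (0:Int) + 3 = ((3:Nat):Int) by norm_num]
      rw [PySem.List.slice_zero_start, PySem.List.slice_to_natCast]
    · by_cases h3 : 3 ≤ (a :: rest).length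
      · have ih := pvSliceList ((a :: rest).drop 3)
        have hlen : (((a :: rest).drop 3).length : Int) = ((a :: rest).length : Int) - 3 := by
          simp only [List.length_drop, List.length_cons] at h3 ⊢; push_cast; omega
        rw [← hlen] at *
        rw [← ih]
        apply List.map_congr_left
        intro i hi
        have h0i : 0 ≤ i := by
          rcases (PySem.List.mem_pyRange_iff_of_pos (by norm_num) i).mp hi with ⟨h1, _⟩
          exact h1
        simpa [Function.comp] using pvSliceShift (a :: rest) i h0i
      · have hd : (a :: rest).drop 3 = [] := by
          simp only [List.length_cons] at h3
          apply List.drop_eq_nil_of_le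
          simp only [List.length_cons]
          omega
        rw [hd, pvRange_nil _ (by simp only [List.length_cons] at h3 ⊢; push_cast; omega)]
        simp [pvChunks, pvFull, pvRem]
termination_by l => l.length
decreasing_by simp

-- every Python string is ofList of its char list
theorem pvStrSlice (s : String) (a b : Option Int) :
    PySem.Str.slice s a b = String.ofList (PySem.List.slice s.toList a b) := by
  apply String.toList_inj.mp
  simp [PySem.Str.toList_slice]

-- "".join ignores a trailing empty part
theorem pvJoinTrailEmpty (o : List String) :
    PySem.Str.join "" (o ++ [""]) = PySem.Str.join "" o := by
  apply String.toList_inj.mp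
  simp only [PySem.Str.toList_join, PySem.Chars.join, List.intercalate, List.map_append]
  have flat : ∀ l : List (List Char), (List.intersperse ([] : List Char) l).flatten = l.flatten := by
    intro l
    induction l with
    | nil => rfl
    | cons a t ih =>
      cases t with
      | nil => rfl
      | cons b u => simp_all [List.intersperse]
  simp [flat]

-- B's character fold over l = the codon fold over the full chunks, remainder left in the buffer
theorem pvFoldB (m : Bool) : ∀ (l : List Char) (s : Int) (o : List String),
    l.foldl (pvStepB m) (s, o, ([] : List Char))
      = ((((pvFull l).map String.ofList).foldl (pvBody m) (s, o)).1,
         (((pvFull l).map String.ofList).foldl (pvBody m) (s, o)).2,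
         pvRem l)
  | [] => by intro s o; simp [pvFull, pvRem]
  | [a] => by intro s o; simp [pvFull, pvRem, pvStepB]
  | [a, b] => by intro s o; simp [pvFull, pvRem, pvStepB]
  | a :: b :: c :: rest => by
    intro s o
    have s1 : pvStepB m (s, o, ([] : List Char)) a = (s, o, [a]) := by
      simp [pvStepB]
    have s2 : pvStepB m (s, o, [a]) b = (s, o, [a, b]) := by
      simp [pvStepB]
    have s3 : pvStepB m (s, o, [a, b]) c
        = ((pvBody m (s, o) (String.ofList [a, b, c])).1,
           (pvBody m (s, o) (String.ofList [a, b, c])).2, ([] : List Char)) := by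
      simp only [pvStepB, pvBody, pvIsStop]
      norm_num
      split_ifs <;> simp
    simp only [List.foldl_cons, s1, s2, s3]
    rw [pvFoldB m rest]
    simp [pvFull, pvRem]

-- A computes the codon fold over the chunk list
theorem pvA_eq (sequence action : String) :
    stop_handler sequence action
      = (PySem.Str.join ""
            ((((pvChunks sequence.toList).map String.ofList).foldl
                (pvBody (action == "soft-mask")) ((0 : Int), ([] : List String))).2),
         (((pvChunks sequence.toList).map String.ofList).foldl
            (pvBody (action == "soft-mask")) ((0 : Int), ([] : List String))).1) := by
  unfold stop_handler
  have hfold :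
      (PySem.List.pyRange 0 (PySem.Str.len sequence) 3).foldl
        (fun (st : Int × List String) i =>
          let codon := PySem.Str.slice sequence (some i) (some (i + 3))
          if pvCodonTable.contains codon then
            (st.1 + 1,
              if action == "soft-mask" then st.2 ++ [(pvCodonTable.get? codon).getD ""] else st.2)
          else (st.1, st.2 ++ [codon]))
        ((0 : Int), ([] : List String))
      = ((pvChunks sequence.toList).map String.ofList).foldl
          (pvBody (action == "soft-mask")) ((0 : Int), ([] : List String)) := by
    rw [← List.foldl_map
          (f := fun i : Int => PySem.Str.slice sequence (some i) (some (i + 3)))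
          (g := fun (st : Int × List String) codon =>
            if pvCodonTable.contains codon then
              (st.1 + 1,
                if action == "soft-mask" then st.2 ++ [(pvCodonTable.get? codon).getD ""] else st.2)
            else (st.1, st.2 ++ [codon]))]
    have hmap :
        (PySem.List.pyRange 0 (PySem.Str.len sequence) 3).map
            (fun i : Int => PySem.Str.slice sequence (some i) (some (i + 3)))
          = (pvChunks sequence.toList).map String.ofList := by
      rw [show PySem.Str.len sequence = ((sequence.toList.length : Nat) : Int) by simp]
      rw [← pvSliceList sequence.toList, List.map_map]
      apply List.map_congr_left
      intro i _
      simp [Function.comp, pvStrSlice]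
    rw [hmap]
    apply PySem.List.foldl_congr_mem
    intro acc c _
    exact pvBodyA_eq (action == "soft-mask") acc c
  rw [hfold]

-- ===== VERDICT =====
theorem stop_handler_spec : Claim_equal_stop_handler := by
  unfold Claim_equal_stop_handler
  intro sequence action _
  unfold Spec_stop_handler
  rw [pvA_eq]
  unfold stop_handler_alt
  show _ = (PySem.Str.join ""
      ((sequence.toList.foldl (pvStepB (action == "soft-mask")) ((0 : Int), ([] : List String), ([] : List Char))).2.1
        ++ [String.ofList ((sequence.toList.foldl (pvStepB (action == "soft-mask")) ((0 : Int), ([] : List String), ([] : List Char))).2.2)]),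
    (sequence.toList.foldl (pvStepB (action == "soft-mask")) ((0 : Int), ([] : List String), ([] : List Char))).1)
  rw [pvFoldB (action == "soft-mask") sequence.toList 0 []]
  set m := (action == "soft-mask")
  set l := sequence.toList
  by_cases hrem : pvRem l = []
  · have hch : pvChunks l = pvFull l := by simp [pvChunks, hrem]
    rw [hch, hrem]
    rw [show String.ofList ([] : List Char) = "" from rfl, pvJoinTrailEmpty]
  · have hch : pvChunks l = pvFull l ++ [pvRem l] := by simp [pvChunks, hrem]
    rw [hch]
    simp only [List.map_append, List.map_cons, List.map_nil, List.foldl_append, List.foldl_cons,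
      List.foldl_nil]
    rw [show pvBody m (((pvFull l).map String.ofList).foldl (pvBody m) (0, []))
          (String.ofList (pvRem l))
        = ((((pvFull l).map String.ofList).foldl (pvBody m) (0, [])).1,
           (((pvFull l).map String.ofList).foldl (pvBody m) (0, [])).2
             ++ [String.ofList (pvRem l)]) from by
      unfold pvBody
      rw [pvIsStop_short _ (pvRem_len l)]
      simp]
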